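-- pv_equiv track=rewrite | github.com/helioero/Python_Study | BombingGoldenFlower/Base/card_method.py | compute_card_point
-- ===== SOURCE A (Python) =====
-- def compute_card_point(card):
--     """ 计算牌面点数大小 """
--     color_card = []
--     point_card = []
--
--     for i in range(len(card)):
--         index_point_card = []
--         index_color_card = []
--         for j in range(len(card[i])):
--             point = card[i][j]
--             if point <= 13:
--                 color_type = 1
--                 if point == 1:
--                     point = 14
--             elif point < 27:
--                 color_type = 2
--                 point -= 13
--                 if point == 1:
--                     point = 14
--             elif point < 40:
--                 color_type = 3
--                 point -= 13 * 2
--                 if point == 1: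
--                     point = 14
--             else:
--                 color_type = 4
--                 point -= 13 * 3
--                 if point == 1:
--                     point = 14
--
--             index_color_card.append(color_type)
--             index_point_card.append(point)
--         point_card.append(index_point_card)
--         color_card.append(index_color_card)
--
--     return point_card, color_card
-- ===== SOURCE B (Python) =====
-- def compute_card_point(card):
--     # pass 1: colors via bounded repeated subtraction (while-loop) instead of a branch ladder
--     color_card = []
--     for row in card:
--         cols = []
--         for p in row:
--             c = 1
--             while p > 13 and c < 4:
--                 p -= 13
--                 c += 1
--             cols.append(c)
--         color_card.append(cols)
--     # pass 2: points derived from the already-computed color matrix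
--     point_card = []
--     for row, cols in zip(card, color_card):
--         pts = []
--         for p, c in zip(row, cols):
--             q = p - 13 * (c - 1)
--             pts.append(14 if q == 1 else q)
--         point_card.append(pts)
--     return point_card, color_card
-- ===== Notes on version B (the rewrite author's own statement) =====
-- stated objective: alternative
-- what changed: B is a two-stage algorithm: a first pass computes the color matrix by bounded repeated subtraction (a while-loop subtracting 13 up to three times) instead of A's four-way if/elif range cascade, and a second separate pass derives the point matrix from the input zipped with the already-computed color matrix; A's single fused loop with four branch cases disappears.
import Mathlib
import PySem

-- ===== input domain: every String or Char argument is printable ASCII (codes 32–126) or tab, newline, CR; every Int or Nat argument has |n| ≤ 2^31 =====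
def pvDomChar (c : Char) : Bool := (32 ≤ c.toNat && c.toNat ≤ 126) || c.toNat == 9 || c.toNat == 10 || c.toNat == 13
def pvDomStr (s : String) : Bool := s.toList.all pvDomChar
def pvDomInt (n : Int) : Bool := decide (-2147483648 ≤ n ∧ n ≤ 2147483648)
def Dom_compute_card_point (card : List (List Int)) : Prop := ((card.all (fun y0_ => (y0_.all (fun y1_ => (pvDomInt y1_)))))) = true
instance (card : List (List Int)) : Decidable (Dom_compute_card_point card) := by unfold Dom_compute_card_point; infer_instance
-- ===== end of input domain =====

-- B computes the result in two separate passes — a color matrix by bounded repeated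
-- subtraction (a while-loop) and then the point matrix from the input zipped with that
-- color matrix — replacing A's single fused loop with its four-way branch cascade (objective: alternative).

-- ===== PORT A =====
def compute_card_point (card : List (List Int)) : List (List Int) × List (List Int) :=
  -- state: (point_card, color_card); inner state: (index_point_card, index_color_card)
  let res :=
    (PySem.List.pyRange 0 (PySem.List.len card)).foldl
      (fun (acc : List (List Int) × List (List Int)) i =>
        let row := PySem.List.pyGetD card i []
        let inner :=
          (PySem.List.pyRange 0 (PySem.List.len row)).foldl
            (fun (pr : List Int × List Int) j =>
              let point := PySem.List.pyGetD row j 0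
              let cp : Int × Int :=
                if point ≤ 13 then
                  (1, if point = 1 then 14 else point)
                else if point < 27 then
                  let p := point - 13
                  (2, if p = 1 then 14 else p)
                else if point < 40 then
                  let p := point - 13 * 2
                  (3, if p = 1 then 14 else p)
                else
                  let p := point - 13 * 3
                  (4, if p = 1 then 14 else p)
              (pr.1 ++ [cp.2], pr.2 ++ [cp.1]))
            ([], [])
        (acc.1 ++ [inner.1], acc.2 ++ [inner.2]))
      ([], [])
  (res.1, res.2)

-- ===== PORT B =====
-- the while-loop 'while p > 13 and c < 4: p -= 13; c += 1', with structural fuel: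
-- from c = 1 the guard c < 4 allows at most 3 iterations, so fuel 3 is exact
def pvColorGo : Nat → Int → Int → Int
  | 0, _, c => c
  | fuel + 1, p, c => if 13 < p ∧ c < 4 then pvColorGo fuel (p - 13) (c + 1) else c

def compute_card_point_alt (card : List (List Int)) : List (List Int) × List (List Int) :=
  -- pass 1: color matrix
  let color_card := card.map (fun row => row.map (fun p => pvColorGo 3 p 1))
  -- pass 2: point matrix from the input zipped with the color matrix
  let point_card :=
    (card.zip color_card).map (fun rc =>
      (rc.1.zip rc.2).map (fun pc =>
        let q := pc.1 - 13 * (pc.2 - 1)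
        if q = 1 then 14 else q))
  (point_card, color_card)

-- ===== PRECONDITION & SPEC =====
def Spec_compute_card_point (card : List (List Int)) (out : List (List Int) × List (List Int)) : Prop := out = compute_card_point_alt card
instance (card : List (List Int)) (out : List (List Int) × List (List Int)) : Decidable (Spec_compute_card_point card out) := by unfold Spec_compute_card_point; infer_instance

-- ===== CLAIM (what is proved, stated in full; the proofs are below) =====
def Claim_equal_compute_card_point : Prop := ∀ (card : List (List Int)), Dom_compute_card_point card → Spec_compute_card_point card (compute_card_point card)

-- ===== LEMMAS AND PROOFS =====

-- B's per-element color and point, as plain functions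
def pvBCol (p : Int) : Int := pvColorGo 3 p 1
def pvBPt (p : Int) : Int :=
  let q := p - 13 * (pvBCol p - 1)
  if q = 1 then 14 else q

-- the while-loop from c = 1 evaluates to the color ladder
theorem pvColorGo_one (p : Int) :
    pvColorGo 3 p 1 = if p ≤ 13 then 1 else if p < 27 then 2 else if p < 40 then 3 else 4 := by
  simp only [pvColorGo]
  split_ifs <;> omega

-- zipping a list with a map of itself is a single map
theorem zip_map_self {α β γ : Type} (xs : List α) (f : α → β) (g : α × β → γ) :
    (xs.zip (xs.map f)).map g = xs.map (fun x => g (x, f x)) := by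
  induction xs with
  | nil => rfl
  | cons x xs ih => simp [ih]

-- per element, A's branch cascade produces B's (color, point)
theorem elem_eq (point : Int) :
    (if point ≤ 13 then
        ((1 : Int), if point = 1 then (14 : Int) else point)
      else if point < 27 then
        let p := point - 13
        (2, if p = 1 then 14 else p)
      else if point < 40 then
        let p := point - 13 * 2
        (3, if p = 1 then 14 else p)
      else
        let p := point - 13 * 3
        (4, if p = 1 then 14 else p)) = (pvBCol point, pvBPt point) := by
  unfold pvBPt pvBCol
  rw [pvColorGo_one]
  split_ifs <;> simp_all

-- A's inner loop over a row computes B's two per-row lists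
theorem inner_eq (row : List Int) :
    (PySem.List.pyRange 0 (PySem.List.len row)).foldl
        (fun (pr : List Int × List Int) j =>
          let point := PySem.List.pyGetD row j 0
          let cp : Int × Int :=
            if point ≤ 13 then
              (1, if point = 1 then 14 else point)
            else if point < 27 then
              let p := point - 13
              (2, if p = 1 then 14 else p)
            else if point < 40 then
              let p := point - 13 * 2
              (3, if p = 1 then 14 else p)
            else
              let p := point - 13 * 3
              (4, if p = 1 then 14 else p)
          (pr.1 ++ [cp.2], pr.2 ++ [cp.1]))
        ([], []) =
      (row.map pvBPt, row.map pvBCol) := by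
  rw [PySem.List.foldl_pyRange_pyGetD row (0 : Int)
        (fun (pr : List Int × List Int) point =>
          let cp : Int × Int :=
            if point ≤ 13 then
              (1, if point = 1 then 14 else point)
            else if point < 27 then
              let p := point - 13
              (2, if p = 1 then 14 else p)
            else if point < 40 then
              let p := point - 13 * 2
              (3, if p = 1 then 14 else p)
            else
              let p := point - 13 * 3
              (4, if p = 1 then 14 else p)
          (pr.1 ++ [cp.2], pr.2 ++ [cp.1]))
        ([], []) le_rfl]
  simp only [elem_eq, Int.toNat_zero, List.drop_zero]
  rw [PySem.List.foldl_prod_mk (fun s (e : Int) => s ++ [pvBPt e])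
        (fun s (e : Int) => s ++ [pvBCol e])]
  rw [PySem.List.foldl_append_singleton_eq_map, PySem.List.foldl_append_singleton_eq_map]
  simp

-- ===== VERDICT (by name: the statement is the Claim_ definition above) =====
theorem compute_card_point_spec : Claim_equal_compute_card_point := by
  intro card _
  show compute_card_point card = compute_card_point_alt card
  unfold compute_card_point compute_card_point_alt
  rw [PySem.List.foldl_pyRange_pyGetD card ([] : List Int)
        (fun (acc : List (List Int) × List (List Int)) row =>
          let inner :=
            (PySem.List.pyRange 0 (PySem.List.len row)).foldl
              (fun (pr : List Int × List Int) j =>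
                let point := PySem.List.pyGetD row j 0
                let cp : Int × Int :=
                  if point ≤ 13 then
                    (1, if point = 1 then 14 else point)
                  else if point < 27 then
                    let p := point - 13
                    (2, if p = 1 then 14 else p)
                  else if point < 40 then
                    let p := point - 13 * 2
                    (3, if p = 1 then 14 else p)
                  else
                    let p := point - 13 * 3
                    (4, if p = 1 then 14 else p)
                (pr.1 ++ [cp.2], pr.2 ++ [cp.1]))
              ([], [])
          (acc.1 ++ [inner.1], acc.2 ++ [inner.2]))
        ([], []) le_rfl]
  simp only [inner_eq, Int.toNat_zero, List.drop_zero]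
  rw [PySem.List.foldl_prod_mk
        (fun s (row : List Int) => s ++ [row.map pvBPt])
        (fun s (row : List Int) => s ++ [row.map pvBCol])]
  rw [PySem.List.foldl_append_singleton_eq_map, PySem.List.foldl_append_singleton_eq_map]
  rw [zip_map_self card (fun row => row.map (fun p => pvColorGo 3 p 1))]
  simp only [zip_map_self, List.nil_append]
  rfl
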